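-- pv_equiv track=rewrite | github.com/roddajohn/hypothekids | 2020/projects/project_one/solutions/part_one.py | multiple_multiples_lt
-- ===== SOURCE A (Python) =====
-- def divisible_by(number, factor):
--     return number % factor == 0
--
-- def multiples_lt(root, number):
--     multiples = []
--
--     i = 1
--     while i < number:
--         if divisible_by(i, root):
--             multiples.append(i)
--
--         i += 1
--
--     return multiples
--
-- def multiple_multiples_lt(root_one, root_two, number):
--     root_one_multiples = multiples_lt(root_one, number)
--     root_two_multiples = multiples_lt(root_two, number)
--
--     new_multiples = []
--
--     i = 0
--     while i < len(root_one_multiples):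
--         element = root_one_multiples[i]
--         if not element in new_multiples:
--             new_multiples.append(element)
--         i += 1
--
--     i = 0
--     while i < len(root_two_multiples):
--         element = root_two_multiples[i]
--         if not element in new_multiples:
--             new_multiples.append(element)
--         i += 1
--
--     return new_multiples
-- ===== SOURCE B (Python) =====
-- def multiple_multiples_lt(root_one, root_two, number):
--     ones = []
--     twos = []
--     i = 1
--     while i < number:
--         div_one = i % root_one == 0
--         div_two = i % root_two == 0
--         if div_one:
--             ones.append(i)
--         elif div_two:
--             twos.append(i)
--         i += 1
--     return ones + twos
-- ===== Notes on version B (the rewrite author's own statement) =====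
-- stated objective: faster
-- what changed: One single pass that partitions 1..number-1 into root_one-multiples and root_two-only multiples (computing both divisibility tests each step, so it raises on a zero root exactly where A does), replacing A's two scans plus a quadratic membership-based dedup loop.
import Mathlib
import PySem

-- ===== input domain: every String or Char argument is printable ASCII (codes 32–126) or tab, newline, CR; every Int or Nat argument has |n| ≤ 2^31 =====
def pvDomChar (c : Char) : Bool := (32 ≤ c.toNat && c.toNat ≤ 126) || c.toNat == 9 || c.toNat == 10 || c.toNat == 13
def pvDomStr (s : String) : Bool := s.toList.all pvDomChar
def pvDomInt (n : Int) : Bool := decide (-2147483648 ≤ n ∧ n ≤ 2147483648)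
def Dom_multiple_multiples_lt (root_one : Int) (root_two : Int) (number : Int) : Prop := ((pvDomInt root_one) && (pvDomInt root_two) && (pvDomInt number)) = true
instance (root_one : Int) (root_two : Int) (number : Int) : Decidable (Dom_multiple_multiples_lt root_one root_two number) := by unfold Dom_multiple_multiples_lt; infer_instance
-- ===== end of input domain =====

-- B replaces A's two scans plus quadratic membership-dedup with one single partitioning pass (faster).


-- ===== PORT A =====
def pyDivisibleBy (number factor : Int) : Bool := PySem.Int.mod number factor == 0

def pyMultiplesLtGo (root : Int) (number : Int) (i : Int) (acc : List Int) : List Int :=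
  if _h : i < number then
    pyMultiplesLtGo root number (i + 1) (if pyDivisibleBy i root then acc ++ [i] else acc)
  else acc
termination_by (number - i).toNat
decreasing_by omega

def pyMultiplesLt (root : Int) (number : Int) : List Int := pyMultiplesLtGo root number 1 []

-- A's two index-loops appending each element not already present
def pyDedupInto (xs : List Int) (acc : List Int) : List Int :=
  xs.foldl (fun acc e => if e ∈ acc then acc else acc ++ [e]) acc

def multiple_multiples_lt (root_one : Int) (root_two : Int) (number : Int) : List Int :=
  let root_one_multiples := pyMultiplesLt root_one number
  let root_two_multiples := pyMultiplesLt root_two number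
  pyDedupInto root_two_multiples (pyDedupInto root_one_multiples [])

-- ===== PORT B =====
-- Both divisibility flags are computed each step, as in Source B.
def pvBGo (root_one root_two number : Int) (i : Int) (ones twos : List Int) : List Int :=
  if _h : i < number then
    let div_one := PySem.Int.mod i root_one == 0
    let div_two := PySem.Int.mod i root_two == 0
    if div_one then
      pvBGo root_one root_two number (i + 1) (ones ++ [i]) twos
    else if div_two then
      pvBGo root_one root_two number (i + 1) ones (twos ++ [i])
    else
      pvBGo root_one root_two number (i + 1) ones twos
  else ones ++ twos
termination_by (number - i).toNat
decreasing_by all_goals omega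

def multiple_multiples_lt_alt (root_one : Int) (root_two : Int) (number : Int) : List Int :=
  pvBGo root_one root_two number 1 [] []

-- ===== PRECONDITION & SPEC =====
-- Pre_ excludes exactly the inputs where Python A raises ZeroDivisionError:
-- a zero root with number > 1 (the loops then evaluate i % 0).  B raises there too.
def Pre_multiple_multiples_lt (root_one : Int) (root_two : Int) (number : Int) : Prop :=
  number ≤ 1 ∨ (root_one ≠ 0 ∧ root_two ≠ 0)
instance (root_one : Int) (root_two : Int) (number : Int) : Decidable (Pre_multiple_multiples_lt root_one root_two number) := by unfold Pre_multiple_multiples_lt; infer_instance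

def pvWitness_multiple_multiples_lt : Int × Int × Int := (3, 5, 20)

def Spec_multiple_multiples_lt (root_one : Int) (root_two : Int) (number : Int) (out : List Int) : Prop := out = multiple_multiples_lt_alt root_one root_two number
instance (root_one : Int) (root_two : Int) (number : Int) (out : List Int) : Decidable (Spec_multiple_multiples_lt root_one root_two number out) := by unfold Spec_multiple_multiples_lt; infer_instance

-- ===== CLAIM (what is proved, stated in full; the proofs are below) =====
def Claim_equal_multiple_multiples_lt : Prop := ∀ (root_one : Int) (root_two : Int) (number : Int), Dom_multiple_multiples_lt root_one root_two number → Pre_multiple_multiples_lt root_one root_two number → Spec_multiple_multiples_lt root_one root_two number (multiple_multiples_lt root_one root_two number)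

-- ===== LEMMAS AND PROOFS =====

-- the increasing list of j ∈ [i, n) with p j
def pvSeg (p : Int → Bool) (n : Int) (i : Int) : List Int :=
  if _h : i < n then (if p i then [i] else []) ++ pvSeg p n (i + 1) else []
termination_by (n - i).toNat
decreasing_by omega

theorem pvSeg_stop (p : Int → Bool) (n i : Int) (h : ¬ i < n) : pvSeg p n i = [] := by
  rw [pvSeg]; simp [h]

theorem pvSeg_step (p : Int → Bool) (n i : Int) (h : i < n) :
    pvSeg p n i = (if p i then [i] else []) ++ pvSeg p n (i + 1) := by
  rw [pvSeg]; simp [h]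

theorem pvSeg_mem_aux (p : Int → Bool) (n : Int) :
    ∀ (k : Nat) (i : Int), (n - i).toNat ≤ k →
      ∀ e : Int, e ∈ pvSeg p n i ↔ (i ≤ e ∧ e < n ∧ p e = true) := by
  intro k
  induction k with
  | zero =>
    intro i hk e
    have h : ¬ i < n := by omega
    rw [pvSeg_stop p n i h]
    simp only [List.not_mem_nil, false_iff]
    rintro ⟨h1, h2, _⟩; omega
  | succ k ih =>
    intro i hk e
    by_cases h : i < n
    · rw [pvSeg_step p n i h]
      rw [List.mem_append, ih (i + 1) (by omega) e]
      constructor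
      · rintro (he | he)
        · by_cases hp : p i
          · simp only [hp, if_true, List.mem_singleton] at he
            subst he; exact ⟨le_refl _, h, hp⟩
          · simp [hp] at he
        · exact ⟨by omega, he.2.1, he.2.2⟩
      · rintro ⟨h1, h2, h3⟩
        by_cases he : e = i
        · subst he; left; simp [h3]
        · right; exact ⟨by omega, h2, h3⟩
    · rw [pvSeg_stop p n i h]
      simp only [List.not_mem_nil, false_iff]
      rintro ⟨h1, h2, _⟩; omega

theorem pvSeg_mem (p : Int → Bool) (n i e : Int) :
    e ∈ pvSeg p n i ↔ (i ≤ e ∧ e < n ∧ p e = true) :=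
  pvSeg_mem_aux p n (n - i).toNat i le_rfl e

theorem pvSeg_nodup_aux (p : Int → Bool) (n : Int) :
    ∀ (k : Nat) (i : Int), (n - i).toNat ≤ k → (pvSeg p n i).Nodup := by
  intro k
  induction k with
  | zero =>
    intro i hk
    rw [pvSeg_stop p n i (by omega)]; exact List.nodup_nil
  | succ k ih =>
    intro i hk
    by_cases h : i < n
    · rw [pvSeg_step p n i h]
      by_cases hp : p i
      · simp only [hp, if_true, List.singleton_append, List.nodup_cons]
        refine ⟨fun hc => ?_, ih (i + 1) (by omega)⟩
        have := (pvSeg_mem p n (i + 1) i).mp hc; omega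
      · simpa [hp] using ih (i + 1) (by omega)
    · rw [pvSeg_stop p n i h]; exact List.nodup_nil

theorem pvSeg_nodup (p : Int → Bool) (n i : Int) : (pvSeg p n i).Nodup :=
  pvSeg_nodup_aux p n (n - i).toNat i le_rfl

theorem pvSeg_filter_aux (p r : Int → Bool) (n : Int) :
    ∀ (k : Nat) (i : Int), (n - i).toNat ≤ k →
      (pvSeg p n i).filter r = pvSeg (fun j => p j && r j) n i := by
  intro k
  induction k with
  | zero =>
    intro i hk
    rw [pvSeg_stop p n i (by omega), pvSeg_stop _ n i (by omega)]; rfl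
  | succ k ih =>
    intro i hk
    by_cases h : i < n
    · rw [pvSeg_step p n i h, pvSeg_step _ n i h]
      rw [List.filter_append, ih (i + 1) (by omega)]
      congr 1
      by_cases hp : p i <;> by_cases hr : r i <;> simp [hp, hr]
    · rw [pvSeg_stop p n i h, pvSeg_stop _ n i h]; rfl

theorem pyMultiplesLtGo_eq_aux (root n : Int) :
    ∀ (k : Nat) (i : Int), (n - i).toNat ≤ k → ∀ acc,
      pyMultiplesLtGo root n i acc = acc ++ pvSeg (fun j => pyDivisibleBy j root) n i := by
  intro k
  induction k with
  | zero =>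
    intro i hk acc
    have h : ¬ i < n := by omega
    rw [pyMultiplesLtGo, pvSeg_stop _ n i h]; simp [h]
  | succ k ih =>
    intro i hk acc
    by_cases h : i < n
    · rw [pyMultiplesLtGo]
      simp only [h, dif_pos]
      rw [ih (i + 1) (by omega), pvSeg_step _ n i h]
      by_cases hp : pyDivisibleBy i root <;> simp [hp]
    · rw [pyMultiplesLtGo, pvSeg_stop _ n i h]; simp [h]

theorem pyMultiplesLtGo_eq (root n i : Int) (acc : List Int) :
    pyMultiplesLtGo root n i acc = acc ++ pvSeg (fun j => pyDivisibleBy j root) n i :=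
  pyMultiplesLtGo_eq_aux root n (n - i).toNat i le_rfl acc

theorem pyDedupInto_eq (xs : List Int) (hx : xs.Nodup) : ∀ acc,
    pyDedupInto xs acc = acc ++ xs.filter (fun e => !decide (e ∈ acc)) := by
  induction xs with
  | nil => intro acc; simp [pyDedupInto]
  | cons x xs ih =>
    intro acc
    have hx1 : x ∉ xs := (List.nodup_cons.mp hx).1
    have hx2 : xs.Nodup := (List.nodup_cons.mp hx).2
    by_cases hm : x ∈ acc
    · have hstep : pyDedupInto (x :: xs) acc = pyDedupInto xs acc := by
        simp [pyDedupInto, hm]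
      rw [hstep, ih hx2]
      simp [hm]
    · have hstep : pyDedupInto (x :: xs) acc = pyDedupInto xs (acc ++ [x]) := by
        simp [pyDedupInto, hm]
      rw [hstep, ih hx2]
      have hfc : xs.filter (fun e => !decide (e ∈ acc ++ [x])) = xs.filter (fun e => !decide (e ∈ acc)) := by
        apply List.filter_congr
        intro e he
        have hne : e ≠ x := fun hq => hx1 (hq ▸ he)
        simp [List.mem_append, hne]
      rw [hfc]
      simp [hm]

theorem pvBGo_eq_aux (r1 r2 n : Int) :
    ∀ (k : Nat) (i : Int), (n - i).toNat ≤ k → ∀ ones twos,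
      pvBGo r1 r2 n i ones twos =
        (ones ++ pvSeg (fun j => pyDivisibleBy j r1) n i) ++
        (twos ++ pvSeg (fun j => !pyDivisibleBy j r1 && pyDivisibleBy j r2) n i) := by
  intro k
  induction k with
  | zero =>
    intro i hk ones twos
    have h : ¬ i < n := by omega
    rw [pvBGo, pvSeg_stop _ n i h, pvSeg_stop _ n i h]; simp [h]
  | succ k ih =>
    intro i hk ones twos
    by_cases h : i < n
    · rw [pvBGo]
      simp only [h, dif_pos]
      rw [pvSeg_step (fun j => pyDivisibleBy j r1) n i h,
          pvSeg_step (fun j => !pyDivisibleBy j r1 && pyDivisibleBy j r2) n i h]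
      by_cases h1 : PySem.Int.mod i r1 == 0
      · have hd : pyDivisibleBy i r1 = true := h1
        rw [if_pos h1, ih (i + 1) (by omega)]
        simp [hd]
      · have hd : pyDivisibleBy i r1 = false := by
          unfold pyDivisibleBy; exact Bool.eq_false_iff.mpr h1
        rw [if_neg h1]
        by_cases h2 : PySem.Int.mod i r2 == 0
        · have hd2 : pyDivisibleBy i r2 = true := h2
          rw [if_pos h2, ih (i + 1) (by omega)]
          simp [hd, hd2]
        · have hd2 : pyDivisibleBy i r2 = false := by
            unfold pyDivisibleBy; exact Bool.eq_false_iff.mpr h2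
          rw [if_neg h2, ih (i + 1) (by omega)]
          simp [hd, hd2]
    · rw [pvBGo, pvSeg_stop _ n i h, pvSeg_stop _ n i h]; simp [h]

theorem pvBGo_eq (r1 r2 n i : Int) (ones twos : List Int) :
    pvBGo r1 r2 n i ones twos =
      (ones ++ pvSeg (fun j => pyDivisibleBy j r1) n i) ++
      (twos ++ pvSeg (fun j => !pyDivisibleBy j r1 && pyDivisibleBy j r2) n i) :=
  pvBGo_eq_aux r1 r2 n (n - i).toNat i le_rfl ones twos

-- ===== VERDICT (by name: the statement is the Claim_ definition above) =====
theorem multiple_multiples_lt_spec : Claim_equal_multiple_multiples_lt := by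
  intro r1 r2 n _ _
  unfold Spec_multiple_multiples_lt multiple_multiples_lt multiple_multiples_lt_alt pyMultiplesLt
  rw [pyMultiplesLtGo_eq, pyMultiplesLtGo_eq, pvBGo_eq]
  set p1 : Int → Bool := fun j => pyDivisibleBy j r1 with hp1
  set p2 : Int → Bool := fun j => pyDivisibleBy j r2 with hp2
  simp only [List.nil_append]
  rw [pyDedupInto_eq _ (pvSeg_nodup p1 n 1), pyDedupInto_eq _ (pvSeg_nodup p2 n 1)]
  simp only [List.nil_append, List.not_mem_nil, decide_false, Bool.not_false, List.filter_true]
  congr 1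
  have hfc : (pvSeg p2 n 1).filter (fun e => !decide (e ∈ pvSeg p1 n 1)) =
      (pvSeg p2 n 1).filter (fun e => !p1 e) := by
    apply List.filter_congr
    intro e he
    have hb := (pvSeg_mem p2 n 1 e).mp he
    by_cases hp : p1 e
    · simp [hp, (pvSeg_mem p1 n 1 e).mpr ⟨hb.1, hb.2.1, hp⟩]
    · have hni : e ∉ pvSeg p1 n 1 := fun hc => hp ((pvSeg_mem p1 n 1 e).mp hc).2.2
      simp [hp, hni]
  rw [hfc, pvSeg_filter_aux p2 (fun e => !p1 e) n (n - 1).toNat 1 le_rfl]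
  congr 1
  funext j
  simp [hp1, hp2, Bool.and_comm]
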